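-- pv_equiv track=rewrite | github.com/Weeeendi/HEX2UNICODE | UnicodeTohex.py | delSpace
-- ===== SOURCE A (Python) =====
-- def delSpace(s):
--     s1 = s.split()
--     s2 = "".join(s1)
--     if (len(s2)%4)!=0 or len(s2)==0:
--         return None
--     Hexlist = '' #定义一个空字符串
--     for i in range(int(len(s2)/4)):
--             Hex_2char = s2[(i*4): (i*4+4)]
--             little_endian_char = Hex_2char[2:4]+Hex_2char[0:2]
--             Hexlist+=little_endian_char
--
--     return Hexlist
--
--
--
--     return s2
-- ===== SOURCE B (Python) =====
-- def delSpace(s):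
--     t = "".join(s.split())
--     if len(t) == 0 or len(t) % 4 != 0:
--         return None
--     it = iter(t)
--     return "".join(c + d + a + b for a, b, c, d in zip(it, it, it, it))
-- ===== Notes on version B (the rewrite author's own statement) =====
-- stated objective: idiomatic
-- what changed: A slices out each 4-char chunk by index arithmetic, re-slices it, and grows a string with +=; B makes one linear pass that consumes the characters four at a time via zip(it, it, it, it) and joins the swapped quadruples once.
import Mathlib
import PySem

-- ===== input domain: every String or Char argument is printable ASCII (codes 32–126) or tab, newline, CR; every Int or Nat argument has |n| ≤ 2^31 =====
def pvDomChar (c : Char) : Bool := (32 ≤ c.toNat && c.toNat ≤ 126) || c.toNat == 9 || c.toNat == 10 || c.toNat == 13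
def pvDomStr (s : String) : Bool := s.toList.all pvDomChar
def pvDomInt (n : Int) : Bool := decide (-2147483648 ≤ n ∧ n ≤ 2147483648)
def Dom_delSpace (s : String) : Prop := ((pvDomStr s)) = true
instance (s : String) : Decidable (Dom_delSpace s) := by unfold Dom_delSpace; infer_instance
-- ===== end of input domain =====

-- B replaces A's index-arithmetic chunk loop (slice, re-slice, string +=) by a single
-- linear pass that consumes the characters four at a time and emits them swapped (one pass, no index arithmetic; idiomatic).

-- ===== PORT A =====
-- literal port of A: split/join, the %4 and emptiness guard, then an index loop over
-- range(len//4) slicing out each 4-char chunk, re-slicing it, and appending to the accumulator.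
-- int(len(s2)/4) is computed as (len : Int) / 4 — exact here because the branch guarantees 4 ∣ len.
def delSpace (s : String) : Option String :=
  let s1 := PySem.Chars.split₀ s.toList
  let s2 := PySem.Chars.join [] s1
  if s2.length % 4 ≠ 0 ∨ s2.length = 0 then none
  else
    let hexlist := (PySem.List.pyRange 0 ((s2.length : Int) / 4) 1).foldl
      (fun acc i =>
        let hex2 := PySem.List.slice s2 (some (i * 4)) (some (i * 4 + 4))
        let littleEndian := PySem.List.slice hex2 (some 2) (some 4) ++ PySem.List.slice hex2 (some 0) (some 2)
        acc ++ littleEndian) []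
    some (String.ofList hexlist)

-- ===== PORT B =====
-- port of Source B's zip(it, it, it, it) pass: consume four characters at a time, emit them swapped
def swap4Chunks : List Char → List Char
  | a :: b :: c :: d :: rest => c :: d :: a :: b :: swap4Chunks rest
  | _ => []

def delSpace_alt (s : String) : Option String :=
  let t := PySem.Chars.join [] (PySem.Chars.split₀ s.toList)
  if t.length = 0 ∨ t.length % 4 ≠ 0 then none
  else some (String.ofList (swap4Chunks t))

-- ===== PRECONDITION & SPEC =====
def Spec_delSpace (s : String) (out : Option String) : Prop := out = delSpace_alt s
instance (s : String) (out : Option String) : Decidable (Spec_delSpace s out) := by unfold Spec_delSpace; infer_instance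

-- ===== CLAIM (what is proved, stated in full; the proofs are below) =====
def Claim_equal_delSpace : Prop := ∀ (s : String), Dom_delSpace s → Spec_delSpace s (delSpace s)

-- ===== LEMMAS AND PROOFS =====

lemma swap4Chunks_cons (a b c d : Char) (r : List Char) :
    swap4Chunks (a :: b :: c :: d :: r) = c :: d :: a :: b :: swap4Chunks r := rfl

-- A's loop, started at chunk j with accumulator acc, appends exactly swap4Chunks of the tail.
lemma loop_eq_swap4 (cs : List Char) :
    ∀ (n j : Nat) (acc : List Char), cs.length = 4 * j + 4 * n →
    (PySem.List.pyRange (j : Int) ((j : Int) + (n : Int)) 1).foldl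
      (fun acc i =>
        let hex2 := PySem.List.slice cs (some (i * 4)) (some (i * 4 + 4))
        let littleEndian := PySem.List.slice hex2 (some 2) (some 4) ++ PySem.List.slice hex2 (some 0) (some 2)
        acc ++ littleEndian) acc
      = acc ++ swap4Chunks (cs.drop (4 * j)) := by
  intro n
  induction n with
  | zero =>
    intro j acc hlen
    rw [PySem.List.pyRange_one_eq_nil (by omega)]
    have hd : cs.drop (4 * j) = [] := by
      apply List.drop_eq_nil_of_le; omega
    simp [hd, swap4Chunks]
  | succ n ih =>
    intro j acc hlen
    have hlt : (j : Int) < (j : Int) + ((n : Nat) + 1 : Nat) := by push_cast; omega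
    rw [PySem.List.pyRange_one_cons hlt]
    rw [List.foldl_cons]
    -- the dropped tail has at least 4 elements
    have hdlen : (cs.drop (4 * j)).length = 4 * n + 4 := by simp [hlen]; omega
    obtain ⟨a, b, c, d, r, hr⟩ :
        ∃ a b c d r, cs.drop (4 * j) = a :: b :: c :: d :: r := by
      match h : cs.drop (4 * j) with
      | a :: b :: c :: d :: r => exact ⟨a, b, c, d, r, rfl⟩
      | [] | [_] | [_, _] | [_, _, _] => simp [h] at hdlen
    -- the chunk A slices out is [a, b, c, d]
    have hslice : PySem.List.slice cs (some ((j : Int) * 4)) (some ((j : Int) * 4 + 4)) = [a, b, c, d] := by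
      have h4 : ((j : Int) * 4) = ((4 * j : Nat) : Int) := by push_cast; ring
      have h44 : ((j : Int) * 4 + 4) = ((4 * j : Nat) : Int) + ((4 : Nat) : Int) := by push_cast; ring
      rw [h44, h4, PySem.List.slice_natCast_add, hr]
      rfl
    have hre : PySem.List.slice [a, b, c, d] (some (2 : Int)) (some (4 : Int)) ++
        PySem.List.slice [a, b, c, d] (some (0 : Int)) (some (2 : Int)) = [c, d, a, b] := rfl
    have hcast : (j : Int) + 1 = ((j + 1 : Nat) : Int) := by push_cast; ring
    have hend : (j : Int) + ((n : Nat) + 1 : Nat) = ((j + 1 : Nat) : Int) + (n : Int) := by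
      push_cast; ring
    have hdrop : cs.drop (4 * (j + 1)) = r := by
      have : cs.drop (4 * (j + 1)) = (cs.drop (4 * j)).drop 4 := by
        rw [List.drop_drop]; ring_nf
      rw [this, hr]; rfl
    simp only [hslice, hre, hcast, hend]
    rw [ih (j + 1) _ (by omega), hdrop, hr, swap4Chunks_cons]
    simp

-- ===== VERDICT (by name: the statement is the Claim_ definition above) =====
theorem delSpace_spec : Claim_equal_delSpace := by
  intro s _
  unfold Spec_delSpace delSpace delSpace_alt
  set t := PySem.Chars.join [] (PySem.Chars.split₀ s.toList) with ht
  by_cases h : t.length % 4 ≠ 0 ∨ t.length = 0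
  · rw [if_pos h, if_pos (by omega)]
  · rw [if_neg h, if_neg (by omega)]
    push Not at h
    obtain ⟨h4, h0⟩ := h
    obtain ⟨n, hn⟩ : ∃ n, t.length = 4 * n := ⟨t.length / 4, by omega⟩
    have hdiv : ((t.length : Int)) / 4 = (n : Int) := by omega
    rw [hdiv]
    have := loop_eq_swap4 t n 0 [] (by omega)
    simp only [Nat.cast_zero, zero_add, Nat.mul_zero, List.drop_zero, List.nil_append] at this
    rw [this]
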